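-- pv_equiv track=rewrite | github.com/dongsik93/HomeStudy | etc/2번.py | solution
-- ===== SOURCE A (Python) =====
-- def solution(people, tshirts):
--     answer = 0
--
--     t = {}
--     for i in tshirts:
--         if(i not in t):
--             t[i] = 1
--         else:
--             t[i] += 1
--
--     for i in people:
--         for j in t.keys():
--             if(i <= j and t[j] != 0):
--                 answer += 1
--                 t[j] -= 1
--     return answer
-- ===== SOURCE B (Python) =====
-- def solution(people, tshirts):
--     # Each size's stock is consumed independently: a person takes one shirt of
--     # EVERY size >= their size while stock remains, so size s contributes
--     # min(count(s), number of people <= s).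
--     counts = {}
--     for s in tshirts:
--         counts[s] = counts.get(s, 0) + 1
--     return sum(min(c, sum(1 for p in people if p <= s)) for s, c in counts.items())
-- ===== Notes on version B (the rewrite author's own statement) =====
-- stated objective: simpler
-- what changed: A simulates the process with a mutable stock dict, looping over every remaining size for every person; B observes that each size's stock is consumed independently and returns the closed form sum over distinct sizes of min(count, number of people <= size), with no mutation and no simulation.
import Mathlib
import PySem

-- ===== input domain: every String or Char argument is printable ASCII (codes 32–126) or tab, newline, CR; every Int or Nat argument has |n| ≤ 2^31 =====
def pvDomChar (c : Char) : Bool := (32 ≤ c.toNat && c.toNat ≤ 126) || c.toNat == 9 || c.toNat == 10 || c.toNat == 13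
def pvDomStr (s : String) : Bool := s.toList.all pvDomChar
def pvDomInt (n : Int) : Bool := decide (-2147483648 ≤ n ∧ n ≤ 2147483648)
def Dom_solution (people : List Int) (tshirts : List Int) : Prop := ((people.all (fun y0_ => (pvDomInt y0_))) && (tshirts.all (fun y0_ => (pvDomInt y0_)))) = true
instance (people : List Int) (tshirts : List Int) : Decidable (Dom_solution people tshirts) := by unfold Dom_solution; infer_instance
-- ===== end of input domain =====

-- B replaces A's per-person simulation over a mutable stock dict by the closed form
-- sum over distinct sizes of min(count, #people ≤ size); same cost class, no mutation.

-- ===== PORT A =====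
-- inner loop body: `if(i <= j and t[j] != 0): answer += 1; t[j] -= 1`
-- (t[j] is read with getD _ 0; j is always a key of t, so Python's t[j] never raises)
def pvStepA (i : Int) (st : Int × PySem.Dict Int Int) (j : Int) : Int × PySem.Dict Int Int :=
  if i ≤ j ∧ st.2.getD j 0 ≠ 0 then (st.1 + 1, st.2.insert j (st.2.getD j 0 - 1))
  else st

def solution (people : List Int) (tshirts : List Int) : Int :=
  -- t = {}; for i in tshirts: if i not in t: t[i] = 1 else: t[i] += 1
  let t : PySem.Dict Int Int :=
    tshirts.foldl (fun t i =>
      if t.contains i = false then t.insert i 1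
      else t.insert i (t.getD i 0 + 1)) PySem.Dict.empty
  -- for i in people: for j in t.keys(): …   (the keys of t never change, so the
  -- live view t.keys() equals the snapshot taken at the start of the inner loop)
  (people.foldl (fun st i => st.2.keys.foldl (pvStepA i) st) ((0 : Int), t)).1

-- ===== PORT B =====
def solution_alt (people : List Int) (tshirts : List Int) : Int :=
  -- counts = {}; for s in tshirts: counts[s] = counts.get(s, 0) + 1
  let counts : PySem.Dict Int Int :=
    tshirts.foldl (fun d s => d.insert s (d.getD s 0 + 1)) PySem.Dict.empty
  -- sum(min(c, sum(1 for p in people if p <= s)) for s, c in counts.items())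
  (counts.items.map (fun sc => min sc.2 ((people.countP (fun p => decide (p ≤ sc.1)) : Int)))).sum

-- ===== PRECONDITION & SPEC =====
def Spec_solution (people : List Int) (tshirts : List Int) (out : Int) : Prop := out = solution_alt people tshirts
instance (people : List Int) (tshirts : List Int) (out : Int) : Decidable (Spec_solution people tshirts out) := by unfold Spec_solution; infer_instance

-- ===== CLAIM (what is proved, stated in full; the proofs are below) =====
def Claim_equal_solution : Prop := ∀ (people : List Int) (tshirts : List Int), Dom_solution people tshirts → Spec_solution people tshirts (solution people tshirts)

-- ===== LEMMAS AND PROOFS =====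

-- A's counting loop builds exactly Counter(tshirts): the two branches write the same value.
lemma pv_buildA_eq (tshirts : List Int) :
    tshirts.foldl (fun t i =>
      if t.contains i = false then t.insert i 1
      else t.insert i (t.getD i 0 + 1)) PySem.Dict.empty
      = PySem.Dict.counter tshirts := by
  rw [← PySem.Dict.foldl_insert_getD_add_one_eq_counter]
  congr 1
  funext t i
  by_cases h : t.contains i = false
  · rw [if_pos h, PySem.Dict.getD_of_not_contains t (0 : Int) h]
    norm_num
  · simp [h]

-- the step only decrements when the value is nonzero, so it never inserts a fresh key
lemma pv_contains_of_getD_ne (d : PySem.Dict Int Int) (k : Int)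
    (h : d.getD k 0 ≠ 0) : d.contains k = true := by
  by_cases hc : d.contains k = true
  · exact hc
  · exact absurd (PySem.Dict.getD_of_not_contains d (0 : Int) (by simpa using hc)) h

-- one person's pass over the (distinct) key list: the answer grows by the number of
-- still-stocked sizes ≥ i, the keys are unchanged, and exactly those stocks drop by 1
lemma pv_inner (i : Int) :
    ∀ (ks : List Int) (a : Int) (d : PySem.Dict Int Int), ks.Nodup →
      (ks.foldl (pvStepA i) (a, d)).1
          = a + (ks.countP (fun j => decide (i ≤ j ∧ d.getD j 0 ≠ 0)) : Int) ∧
      (ks.foldl (pvStepA i) (a, d)).2.keys = d.keys ∧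
      ∀ j : Int, (ks.foldl (pvStepA i) (a, d)).2.getD j 0
          = if j ∈ ks ∧ i ≤ j ∧ d.getD j 0 ≠ 0 then d.getD j 0 - 1 else d.getD j 0 := by
  intro ks
  induction ks with
  | nil => simp
  | cons k ks ih =>
    intro a d hnd
    have hk : k ∉ ks := (List.nodup_cons.mp hnd).1
    have hnd' := (List.nodup_cons.mp hnd).2
    by_cases hc : i ≤ k ∧ d.getD k 0 ≠ 0
    · have hstep : pvStepA i (a, d) k = (a + 1, d.insert k (d.getD k 0 - 1)) := by
        simp [pvStepA, hc]
      have hcont : d.contains k = true := pv_contains_of_getD_ne d k hc.2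
      set d1 := d.insert k (d.getD k 0 - 1) with hd1
      have hg1 : ∀ j, d1.getD j 0 = if j = k then d.getD k 0 - 1 else d.getD j 0 := by
        intro j; rw [hd1, PySem.Dict.getD_insert d k j _ 0]
      obtain ⟨h1, h2, h3⟩ := ih (a + 1) d1 hnd'
      refine ⟨?_, ?_, ?_⟩
      · rw [List.foldl_cons, hstep, h1]
        have hcount : ks.countP (fun j => decide (i ≤ j ∧ d1.getD j 0 ≠ 0))
            = ks.countP (fun j => decide (i ≤ j ∧ d.getD j 0 ≠ 0)) := by
          apply List.countP_congr
          intro j hj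
          have : j ≠ k := fun h => hk (h ▸ hj)
          simp [hg1 j, this]
        rw [hcount, List.countP_cons]
        simp only [decide_eq_true_eq, if_pos hc]
        push_cast
        ring
      · rw [List.foldl_cons, hstep, h2, hd1,
          PySem.Dict.keys_insert_of_contains d _ hcont]
      · intro j
        rw [List.foldl_cons, hstep, h3 j, hg1 j]
        by_cases hjk : j = k
        · subst hjk
          simp [hk, hc]
        · simp [hjk, List.mem_cons]
    · have hstep : pvStepA i (a, d) k = (a, d) := by
        simp [pvStepA, hc]
      obtain ⟨h1, h2, h3⟩ := ih a d hnd'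
      refine ⟨?_, ?_, ?_⟩
      · rw [List.foldl_cons, hstep, h1, List.countP_cons]
        simp only [decide_eq_true_eq, if_neg hc]
        push_cast
        ring
      · rw [List.foldl_cons, hstep, h2]
      · intro j
        rw [List.foldl_cons, hstep, h3 j]
        by_cases hjk : j = k
        · subst hjk
          simp [hk, hc]
        · simp [hjk, List.mem_cons]

-- arithmetic core: per size, taking one shirt now and min-ing later equals min-ing with one more eligible person
lemma pv_sum_min_step (p : Int) :
    ∀ (ks : List Int) (v N : Int → Int), (∀ k ∈ ks, 0 ≤ v k) → (∀ k ∈ ks, 0 ≤ N k) →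
      (ks.countP (fun k => decide (p ≤ k ∧ v k ≠ 0)) : Int)
        + (ks.map (fun k => min (if p ≤ k ∧ v k ≠ 0 then v k - 1 else v k) (N k))).sum
      = (ks.map (fun k => min (v k) (N k + if p ≤ k then 1 else 0))).sum := by
  intro ks
  induction ks with
  | nil => simp
  | cons k ks ih =>
    intro v N hv hN
    have hvk := hv k (List.mem_cons_self ..)
    have hNk := hN k (List.mem_cons_self ..)
    have ih' := ih v N (fun x hx => hv x (List.mem_cons_of_mem _ hx))
      (fun x hx => hN x (List.mem_cons_of_mem _ hx))
    simp only [List.map_cons, List.sum_cons, List.countP_cons]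
    push_cast
    rw [← ih']
    by_cases hp : p ≤ k <;> by_cases h0 : v k = 0 <;> simp [hp, h0] <;> omega

-- the whole simulation: with nonnegative stocks and distinct keys, the answer is
-- the sum over sizes of min(stock, #people ≤ size)
lemma pv_outer :
    ∀ (people : List Int) (a : Int) (d : PySem.Dict Int Int), d.keys.Nodup →
      (∀ j : Int, 0 ≤ d.getD j 0) →
      (people.foldl (fun st i => st.2.keys.foldl (pvStepA i) st) (a, d)).1
        = a + (d.keys.map (fun k =>
            min (d.getD k 0) ((people.countP (fun p => decide (p ≤ k)) : Int)))).sum := by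
  intro people
  induction people with
  | nil =>
    intro a d hnd hv
    simp only [List.foldl_nil, List.countP_nil]
    have : d.keys.map (fun k => min (d.getD k 0) ((0 : Nat) : Int))
        = d.keys.map (fun _ => (0 : Int)) := by
      apply List.map_congr_left
      intro k _
      have := hv k
      simp
      omega
    rw [this]
    simp
  | cons p rest ih =>
    intro a d hnd hv
    simp only [List.foldl_cons]
    obtain ⟨h1, h2, h3⟩ := pv_inner p d.keys a d hnd
    set st1 := d.keys.foldl (pvStepA p) (a, d) with hst1
    have hrw : (rest.foldl (fun st i => st.2.keys.foldl (pvStepA i) st) st1)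
        = (rest.foldl (fun st i => st.2.keys.foldl (pvStepA i) st) (st1.1, st1.2)) := by
      rfl
    rw [hrw, ih st1.1 st1.2 (h2 ▸ hnd) (by
      intro j
      rw [h3 j]
      have := hv j
      split_ifs with h
      · omega
      · exact this)]
    rw [h1, h2]
    have hmap : d.keys.map (fun k =>
          min (st1.2.getD k 0) ((rest.countP (fun q => decide (q ≤ k)) : Int)))
        = d.keys.map (fun k =>
          min (if p ≤ k ∧ d.getD k 0 ≠ 0 then d.getD k 0 - 1 else d.getD k 0)
            ((rest.countP (fun q => decide (q ≤ k)) : Int))) := by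
      apply List.map_congr_left
      intro k hkmem
      rw [h3 k]
      simp [hkmem]
    rw [hmap]
    have hsum := pv_sum_min_step p d.keys (fun k => d.getD k 0)
      (fun k => ((rest.countP (fun q => decide (q ≤ k)) : Int)))
      (fun k _ => hv k) (fun k _ => by positivity)
    have hcount : ∀ k : Int, (((p :: rest).countP (fun q => decide (q ≤ k)) : Nat) : Int)
        = ((rest.countP (fun q => decide (q ≤ k)) : Int)) + if p ≤ k then 1 else 0 := by
      intro k
      rw [List.countP_cons]
      push_cast
      by_cases h : p ≤ k <;> simp [h]
    have hmap2 : d.keys.map (fun k =>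
          min (d.getD k 0) (((p :: rest).countP (fun q => decide (q ≤ k)) : Int)))
        = d.keys.map (fun k =>
          min (d.getD k 0)
            (((rest.countP (fun q => decide (q ≤ k)) : Int)) + if p ≤ k then 1 else 0)) := by
      apply List.map_congr_left
      intro k _
      rw [hcount k]
    rw [hmap2, ← hsum]
    ring

-- ===== VERDICT (by name: the statement is the Claim_ definition above) =====
theorem solution_spec : Claim_equal_solution := by
  intro people tshirts _
  unfold Spec_solution solution solution_alt
  rw [pv_buildA_eq, PySem.Dict.foldl_insert_getD_add_one_eq_counter]
  rw [pv_outer people 0 (PySem.Dict.counter tshirts)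
    (PySem.Dict.nodup_keys_counter tshirts)
    (by intro j; rw [PySem.Dict.getD_counter]; positivity)]
  simp only [PySem.Dict.items_counter, PySem.Dict.keys_counter, List.map_map]
  simp [Function.comp_def, PySem.Dict.getD_counter]
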